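-- pv_equiv track=rewrite | github.com/Tosaaaki/QuantRabbit | tools/session_data.py | _parse_state_focus_snapshot
-- ===== SOURCE A (Python) =====
-- def _parse_state_focus_snapshot(state_text: str) -> dict[str, str]:
--     if not state_text:
--         return {}
--
--     prefixes = (
--         "Best expression NOW:",
--         "Primary vehicle:",
--         "Primary vehicle shelf-life now:",
--         "Backup vehicle:",
--         "Backup vehicle shelf-life now:",
--         "Second-best expression:",
--         "Next fresh risk allowed NOW:",
--         "Next fresh risk shelf-life now:",
--         "20-minute backup trigger armed NOW:",
--         "15-minute backup trigger armed NOW:",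
--         "Best direct-USD seat NOW:",
--     )
--     snapshot: dict[str, str] = {}
--
--     for raw_line in state_text.splitlines():
--         line = raw_line.strip()
--         if not line:
--             continue
--         for prefix in prefixes:
--             if line.startswith(prefix) and prefix not in snapshot:
--                 snapshot[prefix] = line[len(prefix):].strip()
--                 break
--
--     return snapshot
-- ===== SOURCE B (Python) =====
-- def _parse_state_focus_snapshot(state_text: str) -> dict[str, str]:
--     if not state_text:
--         return {}
--
--     prefix_set = frozenset((
--         "Best expression NOW:",
--         "Primary vehicle:",
--         "Primary vehicle shelf-life now:",
--         "Backup vehicle:",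
--         "Backup vehicle shelf-life now:",
--         "Second-best expression:",
--         "Next fresh risk allowed NOW:",
--         "Next fresh risk shelf-life now:",
--         "20-minute backup trigger armed NOW:",
--         "15-minute backup trigger armed NOW:",
--         "Best direct-USD seat NOW:",
--     ))
--
--     # Every prefix consists of colon-free text ended by a single ':', so a line starts
--     # with a prefix exactly when its text up to (and including) the first ':' is that
--     # prefix: one partition + one hash lookup replaces the scan over all prefixes.
--     snapshot: dict[str, str] = {}
--     for raw_line in state_text.splitlines():
--         line = raw_line.strip()
--         head, sep, rest = line.partition(":")
--         if not sep:
--             continue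
--         key = head + ":"
--         if key in prefix_set and key not in snapshot:
--             snapshot[key] = rest.strip()
--     return snapshot
-- ===== Notes on version B (the rewrite author's own statement) =====
-- stated objective: alternative
-- what changed: A scans the 11-prefix tuple with startswith for every line; B instead partitions each line at its first colon and looks the reconstructed head up in a frozenset built once, so the inner prefix scan disappears (valid because every prefix is colon-free text ended by a single colon).
import Mathlib
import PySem

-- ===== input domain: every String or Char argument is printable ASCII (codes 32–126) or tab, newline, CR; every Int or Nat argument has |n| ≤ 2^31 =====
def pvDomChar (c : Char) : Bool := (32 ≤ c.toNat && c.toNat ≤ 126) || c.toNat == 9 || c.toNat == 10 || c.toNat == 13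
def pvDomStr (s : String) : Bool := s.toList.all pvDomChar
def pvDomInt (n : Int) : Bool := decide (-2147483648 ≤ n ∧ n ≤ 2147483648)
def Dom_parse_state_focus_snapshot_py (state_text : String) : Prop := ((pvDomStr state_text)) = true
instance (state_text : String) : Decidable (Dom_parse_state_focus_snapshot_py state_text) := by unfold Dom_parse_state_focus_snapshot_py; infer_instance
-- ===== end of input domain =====

-- B replaces A's per-line scan over the 11-prefix tuple by partitioning the line at its first
-- colon and one hash-set lookup of the reconstructed head (every prefix is colon-free text ended
-- by one ':'), removing the inner scan; same return value.

-- ===== PORT A =====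
def pvPrefixes : List String :=
  ["Best expression NOW:",
   "Primary vehicle:",
   "Primary vehicle shelf-life now:",
   "Backup vehicle:",
   "Backup vehicle shelf-life now:",
   "Second-best expression:",
   "Next fresh risk allowed NOW:",
   "Next fresh risk shelf-life now:",
   "20-minute backup trigger armed NOW:",
   "15-minute backup trigger armed NOW:",
   "Best direct-USD seat NOW:"]

-- one iteration of A's outer loop (the inner for-with-break is the first prefix with
-- `line.startswith(prefix) and prefix not in snapshot`, i.e. List.find? of that conjunction)
def pvStepA (snapshot : PySem.Dict String String) (raw_line : String) : PySem.Dict String String :=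
  let line := PySem.Str.strip raw_line
  if line = "" then snapshot
  else
    match pvPrefixes.find? (fun pfx => PySem.Str.startswith line pfx && !(snapshot.contains pfx)) with
    | some pfx =>
        snapshot.insert pfx (PySem.Str.strip (PySem.Str.slice line (some (PySem.Str.len pfx)) none))
    | none => snapshot

def parse_state_focus_snapshot_py (state_text : String) : List (String × String) :=
  if state_text = "" then []
  else ((PySem.Str.splitlines state_text).foldl pvStepA PySem.Dict.empty).items

-- ===== PORT B =====
-- B's frozenset of prefixes, built once
def pvPrefixSet : PySem.Set String := PySem.Set.ofList pvPrefixes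

-- hand port of Python's line.partition(":") (exact: PySem has no partition; `none` is the
-- not-found case, where Python returns (line, '', '') with falsy separator)
def pvPartitionColon : List Char → Option (List Char × List Char)
  | [] => none
  | c :: t =>
      if c = ':' then some ([], t)
      else (pvPartitionColon t).map (fun p => (c :: p.1, p.2))

-- one iteration of B's loop over the lines
def pvStepB (snapshot : PySem.Dict String String) (raw_line : String) : PySem.Dict String String :=
  let line := PySem.Str.strip raw_line
  match pvPartitionColon line.toList with
  | none => snapshot
  | some (head, rest) =>
      let key := String.ofList (head ++ [':'])
      if PySem.Set.contains pvPrefixSet key && !(snapshot.contains key) then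
        snapshot.insert key (String.ofList (PySem.Chars.strip rest))
      else snapshot

def parse_state_focus_snapshot_py_alt (state_text : String) : List (String × String) :=
  if state_text = "" then []
  else ((PySem.Str.splitlines state_text).foldl pvStepB PySem.Dict.empty).items

-- ===== PRECONDITION & SPEC =====
def Spec_parse_state_focus_snapshot_py (state_text : String) (out : List (String × String)) : Prop := out = parse_state_focus_snapshot_py_alt state_text
instance (state_text : String) (out : List (String × String)) : Decidable (Spec_parse_state_focus_snapshot_py state_text out) := by unfold Spec_parse_state_focus_snapshot_py; infer_instance

-- ===== CLAIM (what is proved, stated in full; the proofs are below) =====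
def Claim_equal_parse_state_focus_snapshot_py : Prop := ∀ (state_text : String), Dom_parse_state_focus_snapshot_py state_text → Spec_parse_state_focus_snapshot_py state_text (parse_state_focus_snapshot_py state_text)

-- ===== LEMMAS AND PROOFS =====

-- partition finds nothing iff the line has no colon
lemma pv_partition_none (cs : List Char) : pvPartitionColon cs = none ↔ ':' ∉ cs := by
  induction cs with
  | nil => simp [pvPartitionColon]
  | cons c t ih =>
      by_cases hc : c = ':'
      · subst hc; simp [pvPartitionColon]
      · simp [pvPartitionColon, hc, Option.map_eq_none_iff, ih, Ne.symm hc]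

-- partition's result: head before the first colon, rest after
lemma pv_partition_some (cs h r : List Char) (hp : pvPartitionColon cs = some (h, r)) :
    cs = h ++ ':' :: r ∧ ':' ∉ h := by
  induction cs generalizing h r with
  | nil => simp [pvPartitionColon] at hp
  | cons c t ih =>
      by_cases hc : c = ':'
      · subst hc
        simp [pvPartitionColon] at hp
        obtain ⟨rfl, rfl⟩ := hp
        simp
      · simp only [pvPartitionColon, if_neg hc, Option.map_eq_some_iff] at hp
        obtain ⟨⟨h', r'⟩, hrec, heq⟩ := hp
        obtain ⟨hh, hr⟩ := Prod.mk.injEq _ _ _ _ ▸ heq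
        obtain ⟨rfl, hnotin⟩ := ih h' r' hrec
        subst hr
        rw [← hh]
        simp [hnotin, Ne.symm hc]

-- every prefix is colon-free text followed by one final ':'
lemma pv_prefix_shape : ∀ p ∈ pvPrefixes,
    p.toList.dropLast.all (· != ':') = true ∧ p.toList.getLast? = some ':' := by decide

-- if q++[c] is a prefix of h++c::r with c in neither q nor h, then q = h
lemma pv_unique_head (c : Char) : ∀ (q h r : List Char), c ∉ q → c ∉ h →
    (q ++ [c]) <+: (h ++ c :: r) → q = h := by
  intro q
  induction q with
  | nil =>
      intro h r _ hh hpre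
      cases h with
      | nil => rfl
      | cons a t =>
          simp only [List.nil_append, List.cons_append, List.cons_prefix_cons] at hpre
          exact absurd (by rw [← hpre.1]; exact List.mem_cons_self) hh
  | cons b q' ih =>
      intro h r hq hh hpre
      cases h with
      | nil =>
          simp only [List.cons_append, List.nil_append, List.cons_prefix_cons] at hpre
          exact absurd (by rw [hpre.1]; exact List.mem_cons_self) hq
      | cons a t =>
          simp only [List.cons_append, List.cons_prefix_cons] at hpre
          have := ih t r (fun hm => hq (List.mem_cons_of_mem _ hm))
            (fun hm => hh (List.mem_cons_of_mem _ hm)) hpre.2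
          rw [hpre.1, this]

-- find? over a list when the predicate can only hold at one designated value
lemma pv_find?_unique {α : Type} [DecidableEq α] (l : List α) (pred : α → Bool) (k : α)
    (hk : ∀ x ∈ l, pred x = true → x = k) :
    l.find? pred = if k ∈ l ∧ pred k = true then some k else none := by
  induction l with
  | nil => simp
  | cons a t ih =>
      by_cases ha : pred a = true
      · have hak : a = k := hk a List.mem_cons_self ha
        subst hak
        simp [List.find?, ha]
      · have hrec := ih (fun x hx => hk x (List.mem_cons_of_mem _ hx))
        have ha' : pred a = false := by simpa using ha
        rw [List.find?_cons_of_neg (by simp [ha']), hrec]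
        by_cases hkt : k ∈ t ∧ pred k = true
        · simp [hkt, List.mem_cons_of_mem _ hkt.1]
        · simp only [if_neg hkt]
          rw [if_neg]
          rintro ⟨hmem, hpk⟩
          rcases List.mem_cons.mp hmem with rfl | hmem'
          · exact absurd hpk (by simp [ha'])
          · exact hkt ⟨hmem', hpk⟩

-- a prefix p matches the stripped line (= h ++ ':' :: r with colon-free h) iff p is exactly h++[':']
lemma pv_match_iff (p : String) (hp : p ∈ pvPrefixes) (h r : List Char) (hh : ':' ∉ h) :
    p.toList <+: (h ++ ':' :: r) ↔ p.toList = h ++ [':'] := by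
  obtain ⟨hfree, hlast⟩ := pv_prefix_shape p hp
  have hne : p.toList ≠ [] := by
    intro hnil; rw [hnil] at hlast; simp at hlast
  have hdecomp : p.toList = p.toList.dropLast ++ [':'] := by
    conv_lhs => rw [← List.dropLast_append_getLast hne]
    rw [List.getLast_eq_iff_getLast?_eq_some hne |>.mpr hlast]
  have hqfree : ':' ∉ p.toList.dropLast := by
    intro hm
    have := List.all_eq_true.mp hfree _ hm
    simp at this
  constructor
  · intro hpre
    rw [hdecomp] at hpre ⊢
    rw [pv_unique_head ':' p.toList.dropLast h r hqfree hh hpre]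
  · intro heq
    rw [heq]
    exact ⟨r, by simp⟩

-- strings are equal iff their character lists are
lemma pv_str_ext (s t : String) (h : s.toList = t.toList) : s = t :=
  String.toList_inj.mp h

-- the two loop bodies agree on every (dict, line) pair
lemma pv_step_eq : pvStepA = pvStepB := by
  funext d raw
  simp only [pvStepA, pvStepB]
  set line := PySem.Str.strip raw with hline
  rcases hpart : pvPartitionColon line.toList with _ | ⟨h, r⟩
  · -- no colon in the line: no prefix can match, both sides keep d
    have hnocolon : ':' ∉ line.toList := (pv_partition_none _).mp hpart
    have hfind : pvPrefixes.find?
        (fun pfx => PySem.Str.startswith line pfx && !(d.contains pfx)) = none := by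
      apply List.find?_eq_none.mpr
      intro p hp hpred
      have hsw : PySem.Str.startswith line p = true := by
        rcases Bool.and_eq_true_iff.mp hpred with ⟨h1, _⟩; exact h1
      have hpre : p.toList <+: line.toList := by
        have := PySem.Str.startswith_eq line p
        rw [this] at hsw
        exact (PySem.Chars.startswith_iff _ _).mp hsw
      obtain ⟨hfree, hlast⟩ := pv_prefix_shape p hp
      have hcol : ':' ∈ p.toList := by
        rcases List.getLast?_eq_some_iff.mp hlast with ⟨l', hl'⟩
        rw [hl']; simp
      exact hnocolon (hpre.subset hcol)
    rw [hfind]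
    split <;> rfl
  · -- line = h ++ ':' :: r with ':' ∉ h; the only possible match is key = h ++ [':']
    obtain ⟨hdecomp, hh⟩ := pv_partition_some _ _ _ hpart
    have hlinne : line ≠ "" := by
      intro h0
      rw [h0] at hdecomp
      simpa using congrArg List.length hdecomp
    rw [if_neg hlinne]
    set key := String.ofList (h ++ [':']) with hkey
    have hkeyl : key.toList = h ++ [':'] := by simp [hkey]
    have hmatch : ∀ p ∈ pvPrefixes,
        PySem.Str.startswith line p = true ↔ p = key := by
      intro p hp
      rw [PySem.Str.startswith_eq, PySem.Chars.startswith_iff, hdecomp]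
      rw [pv_match_iff p hp h r hh]
      constructor
      · intro he; exact pv_str_ext _ _ (by rw [he, hkeyl])
      · intro he; rw [he, hkeyl]
    have hfind := pv_find?_unique pvPrefixes
        (fun pfx => PySem.Str.startswith line pfx && !(d.contains pfx)) key
        (by
          intro x hx hpx
          rcases Bool.and_eq_true_iff.mp hpx with ⟨h1, _⟩
          exact (hmatch x hx).mp h1)
    have hswkey : PySem.Str.startswith line key = true := by
      rw [PySem.Str.startswith_eq, PySem.Chars.startswith_iff, hdecomp, hkeyl]
      exact ⟨r, by simp⟩
    have hswkey' : PySem.Chars.startswith line.toList key.toList = true := by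
      rw [← PySem.Str.startswith_eq]; exact hswkey
    have hmemiff : PySem.Set.contains pvPrefixSet key = true ↔ key ∈ pvPrefixes := by
      unfold pvPrefixSet
      rw [PySem.Set.contains_iff, PySem.Set.mem_ofList]
    have hval : PySem.Str.strip (PySem.Str.slice line (some (PySem.Str.len key)) none)
        = String.ofList (PySem.Chars.strip r) := by
      apply pv_str_ext
      have hslice : (PySem.Str.slice line (some (PySem.Str.len key)) none).toList = r := by
        rw [PySem.Str.toList_slice]
        have hlen : PySem.Str.len key = ((h.length + 1 : Nat) : Int) := by
          simp [PySem.Str.len_eq, hkeyl]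
        rw [hlen, PySem.Chars.slice_eq_listSlice, PySem.List.slice_from_natCast, hdecomp]
        simp [List.drop_append]
      simp only [PySem.Str.toList_strip, hslice, String.toList_ofList]
    cases hsc : PySem.Set.contains pvPrefixSet key with
    | false =>
        have hmem : key ∉ pvPrefixes := fun hm => by
          rw [hmemiff.mpr hm] at hsc; cases hsc
        have hcond : ¬(key ∈ pvPrefixes ∧
            (fun pfx => PySem.Str.startswith line pfx && !d.contains pfx) key = true) :=
          fun hc => hmem hc.1
        rw [hfind, if_neg hcond]
        have hfalse : (PySem.Set.contains pvPrefixSet key && !d.contains key) = false := by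
          rw [hsc]; rfl
        simp only []
        rw [hfalse]
        rfl
    | true =>
        have hmem : key ∈ pvPrefixes := hmemiff.mp hsc
        cases hc2 : d.contains key with
        | true =>
            have hcond : ¬(key ∈ pvPrefixes ∧
                (fun pfx => PySem.Str.startswith line pfx && !d.contains pfx) key = true) := by
              rintro ⟨-, hp2⟩
              simp [hc2] at hp2
            rw [hfind, if_neg hcond]
            have hfalse : (PySem.Set.contains pvPrefixSet key && !d.contains key) = false := by
              rw [hsc, hc2]; rfl
            simp only []
            rw [hfalse]
            rfl
        | false =>
            have hcond : key ∈ pvPrefixes ∧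
                (fun pfx => PySem.Str.startswith line pfx && !d.contains pfx) key = true :=
              ⟨hmem, by simp [hswkey', hc2]⟩
            rw [hfind, if_pos hcond]
            have htrue : (PySem.Set.contains pvPrefixSet key && !d.contains key) = true := by
              rw [hsc, hc2]; rfl
            simp only []
            rw [htrue]
            simp only [if_true]
            rw [hval]

-- ===== VERDICT (by name: the statement is the Claim_ definition above) =====
theorem parse_state_focus_snapshot_py_spec : Claim_equal_parse_state_focus_snapshot_py := by
  intro s _
  unfold Spec_parse_state_focus_snapshot_py parse_state_focus_snapshot_py parse_state_focus_snapshot_py_alt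
  rw [pv_step_eq]
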